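-- pv_equiv track=rewrite | github.com/StopEarth/fb-labs-2019 | cp_4/derkach_fb-73_mykhalko_fb-73_cp4/cp4.py | createLRZforA
-- ===== SOURCE A (Python) =====
-- def createIndexListLRZ(indexlist):
--     indexlist_LRZ = []
--     for i in range(len(indexlist)-1):
--         indexlist_LRZ.append(0)
--     indexlist_LRZ.append(1)
--     return indexlist_LRZ
--
-- def createLRZforA(indexlist):
--     LRZ = createIndexListLRZ(indexlist)
--     forcheck = list(LRZ)
--     counter = 0
--     listforA = list(LRZ)
--     while 1:
--         forcheck_2 = list(LRZ)
--         counter += 1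
--         forswap = indexlist[-1]*LRZ[-1]
--         for i in range(len(indexlist)-1):
--             forswap += indexlist[i]*LRZ[i]
--             LRZ[i] = forcheck_2[i+1]
--         LRZ[i] = forswap % 2
--         listforA.append(forswap % 2)
--         if LRZ == forcheck:
--             break
--     return listforA
-- ===== SOURCE B (Python) =====
-- def createLRZforA(indexlist):
--     # No register at all: the bit stream is generated into one growing list, each new
--     # bit read by window indexing (seq[k+t] over the odd-coefficient taps); the loop
--     # stops when the trailing m-window of the stream is all zero again, and the
--     # output is assembled at the end from slices of the stream.
--     m = len(indexlist) - 1
--     cbit = indexlist[-1] % 2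
--     taps = [t for t in range(m) if indexlist[t] % 2 == 1]
--     zeros = [0] * m
--     seq = list(zeros)
--     k = 0
--     while True:
--         bit = cbit
--         for t in taps:
--             bit += seq[k + t]
--         seq.append(bit % 2)
--         k += 1
--         if seq[k:] == zeros:
--             break
--     return seq[:m] + [1] + seq[m:]
-- ===== Notes on version B (the rewrite author's own statement) =====
-- stated objective: alternative
-- what changed: B maintains no register at all: it generates the bit stream into one growing list, reading each new bit by window indexing seq[k+t] at the odd-coefficient tap offsets, detects the cycle by comparing the trailing m-window of the stream with zeros, and assembles the output at the end from slices -- versus A's per-iteration full register copy, multiply-accumulate over every coefficient and element-wise in-place shift of a mutated register.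
-- outside the precondition, e.g. on createLRZforA([]): A raises IndexError, B raises IndexError; on createLRZforA([5]): A raises UnboundLocalError, B returns [1, 1]
import Mathlib
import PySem

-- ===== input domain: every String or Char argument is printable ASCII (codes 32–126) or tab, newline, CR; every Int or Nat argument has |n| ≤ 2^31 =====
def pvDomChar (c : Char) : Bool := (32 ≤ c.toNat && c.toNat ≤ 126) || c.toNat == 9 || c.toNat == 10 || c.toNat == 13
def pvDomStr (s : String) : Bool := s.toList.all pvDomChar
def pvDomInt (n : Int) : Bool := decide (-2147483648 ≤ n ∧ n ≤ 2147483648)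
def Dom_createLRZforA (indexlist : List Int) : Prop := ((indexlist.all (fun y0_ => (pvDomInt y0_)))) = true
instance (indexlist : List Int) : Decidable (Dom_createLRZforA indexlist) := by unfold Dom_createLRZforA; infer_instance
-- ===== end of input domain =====

-- B maintains no register: it grows a single bit stream, computing each bit by window
-- indexing at the odd-coefficient tap offsets and assembling the output from slices at
-- the end (objective: alternative — no per-step register copies or in-place shifts).

-- ===== PORT A =====
def createIndexListLRZ (indexlist : List Int) : List Int :=
  ((PySem.List.pyRange 0 ((indexlist.length : Int) - 1) 1).foldl
    (fun acc _ => acc ++ [(0 : Int)]) []) ++ [(1 : Int)]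

-- A's `while 1` loop, ported with fuel 2^(len-1): an upper bound on the number of
-- iterations whenever the Python loop terminates (the m = len-1 shifting register
-- cells range over at most 2^m states, and under Pre_ the loop stops no later than
-- the first revisit of the initial state).
def aloop (c forcheck : List Int) : Nat → List Int → List Int → List Int
  | 0, _, listforA => listforA
  | fuel+1, LRZ, listforA =>
    let forcheck2 := LRZ
    let forswap0 := PySem.List.pyGetD c (-1) 0 * PySem.List.pyGetD LRZ (-1) 0
    let p := (PySem.List.pyRange 0 ((c.length : Int) - 1) 1).foldl
      (fun (p : Int × List Int) i =>
        (p.1 + PySem.List.pyGetD c i 0 * PySem.List.pyGetD p.2 i 0,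
         PySem.List.pySetD p.2 i (PySem.List.pyGetD forcheck2 (i + 1) 0)))
      (forswap0, LRZ)
    -- Python's final `LRZ[i] = forswap % 2` reuses the leftover loop variable i = len-2
    let bit := PySem.Int.mod p.1 2
    let LRZ' := PySem.List.pySetD p.2 ((c.length : Int) - 2) bit
    let listforA' := listforA ++ [bit]
    if LRZ' = forcheck then listforA' else aloop c forcheck fuel LRZ' listforA'

def createLRZforA (indexlist : List Int) : List Int :=
  let LRZ := createIndexListLRZ indexlist
  let forcheck := LRZ
  let listforA := LRZ
  aloop indexlist forcheck (2 ^ (indexlist.length - 1)) LRZ listforA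

-- ===== PORT B =====
-- B's `while True` loop, same fuel bound as A's (both Pythons run the identical
-- number of iterations; under Pre_ that number is at most 2^m). k counts steps;
-- the new bit is read out of the growing stream itself at offsets k+t.
def bloop (taps : List Int) (cbit : Int) (zeros : List Int) : Nat → Nat → List Int → List Int
  | 0, _, seq => seq
  | fuel+1, k, seq =>
    let bit := PySem.Int.mod
      (taps.foldl (fun b t => b + PySem.List.pyGetD seq ((k : Int) + t) 0) cbit) 2
    let seq' := seq ++ [bit]
    if PySem.List.slice seq' (some ((k + 1 : Nat) : Int)) none = zeros then seq'
    else bloop taps cbit zeros fuel (k + 1) seq'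

def createLRZforA_alt (indexlist : List Int) : List Int :=
  let m := indexlist.length - 1
  let cbit := PySem.Int.mod (PySem.List.pyGetD indexlist (-1) 0) 2
  let taps := (PySem.List.pyRange 0 ((indexlist.length : Int) - 1) 1).filter
      (fun t => PySem.Int.mod (PySem.List.pyGetD indexlist t 0) 2 == 1)
  let zeros := List.replicate m (0 : Int)
  let seq := bloop taps cbit zeros (2 ^ m) 0 (List.replicate m (0 : Int))
  PySem.List.slice seq none (some (m : Int)) ++ [1] ++ PySem.List.slice seq (some (m : Int)) none

-- ===== PRECONDITION & SPEC =====
-- Pre_ excludes exactly the inputs where Python A does not return: lists of length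
-- < 2 (IndexError on [], UnboundLocalError on length 1) and lists with an even
-- first and odd last coefficient, on which A's `while 1` loop never terminates
-- (the all-zero register state is left and can never be re-entered).
def Pre_createLRZforA (indexlist : List Int) : Prop :=
  2 ≤ indexlist.length ∧
    (PySem.Int.mod (indexlist.getD 0 0) 2 = 1 ∨
      PySem.Int.mod (PySem.List.pyGetD indexlist (-1) 0) 2 = 0)
instance (indexlist : List Int) : Decidable (Pre_createLRZforA indexlist) := by
  unfold Pre_createLRZforA; infer_instance

def pvWitness_createLRZforA : List Int := [1, 0, 1]

def Spec_createLRZforA (indexlist : List Int) (out : List Int) : Prop := out = createLRZforA_alt indexlist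
instance (indexlist : List Int) (out : List Int) : Decidable (Spec_createLRZforA indexlist out) := by unfold Spec_createLRZforA; infer_instance

-- ===== CLAIM (what is proved, stated in full; the proofs are below) =====
def Claim_equal_createLRZforA : Prop := ∀ (indexlist : List Int), Dom_createLRZforA indexlist → Pre_createLRZforA indexlist → Spec_createLRZforA indexlist (createLRZforA indexlist)

-- ===== LEMMAS AND PROOFS =====

theorem createIndexListLRZ_eq (c : List Int) :
    createIndexListLRZ c = List.replicate (c.length - 1) 0 ++ [1] := by
  unfold createIndexListLRZ
  rw [PySem.List.foldl_append_singleton_eq_map (f := fun _ => (0:Int))]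
  congr 1
  simp only [List.nil_append]
  rw [List.map_const']
  congr 1
  rw [PySem.List.length_pyRange_one]
  omega


theorem pyGetD_append_one (s : List Int) (i : Int) (h0 : 0 ≤ i) (h1 : i < s.length) :
    PySem.List.pyGetD (s ++ [(1 : Int)]) i 0 = PySem.List.pyGetD s i 0 := by
  rw [PySem.List.pyGetD_eq_getElem (s ++ [1]) 0 h0 (by simp; omega),
      PySem.List.pyGetD_eq_getElem s 0 h0 (by omega)]
  rw [List.getElem_append_left]


theorem parity_sum (c s : List Int) (ι : List Int) :
    (2 : Int) ∣ ((ι.map (fun i => PySem.List.pyGetD c i 0 * PySem.List.pyGetD s i 0)).sum -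
      ((ι.filter (fun i => PySem.Int.mod (PySem.List.pyGetD c i 0) 2 == 1)).map
        (fun i => PySem.List.pyGetD s i 0)).sum) := by
  induction ι with
  | nil => simp
  | cons i t ih =>
    simp only [List.map_cons, List.sum_cons, List.filter_cons]
    by_cases h : PySem.Int.mod (PySem.List.pyGetD c i 0) 2 = 1
    · simp only [h, beq_self_eq_true, if_pos, List.map_cons, List.sum_cons]
      have hodd : (2 : Int) ∣ PySem.List.pyGetD c i 0 - 1 := by
        rw [PySem.Int.mod_eq_emod_of_pos (by norm_num)] at h
        omega
      have h2 := hodd.mul_right (PySem.List.pyGetD s i 0)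
      have h3 : (PySem.List.pyGetD c i 0 - 1) * PySem.List.pyGetD s i 0
          = PySem.List.pyGetD c i 0 * PySem.List.pyGetD s i 0 - PySem.List.pyGetD s i 0 := by ring
      rw [h3] at h2
      omega
    · have hz : PySem.Int.mod (PySem.List.pyGetD c i 0) 2 = 0 := by
        have := PySem.Int.mod_nonneg (PySem.List.pyGetD c i 0) (b := 2) (by norm_num)
        have := PySem.Int.mod_lt (PySem.List.pyGetD c i 0) (b := 2) (by norm_num)
        omega
      have hdvd : (2 : Int) ∣ PySem.List.pyGetD c i 0 :=
        (PySem.Int.mod_eq_zero_iff_dvd _ _).mp hz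
      have h2 := hdvd.mul_right (PySem.List.pyGetD s i 0)
      simp only [beq_iff_eq, h, if_false]
      omega


theorem aloop_fold (c L : List Int) (m : Nat) (hL : L.length = m + 1)
    (acc : Int) (k : Nat) (hk : k ≤ m) :
    ((PySem.List.pyRange 0 (k : Int) 1).foldl
      (fun (p : Int × List Int) i =>
        (p.1 + PySem.List.pyGetD c i 0 * PySem.List.pyGetD p.2 i 0,
         PySem.List.pySetD p.2 i (PySem.List.pyGetD L (i + 1) 0)))
      (acc, L)) =
    (acc + ((PySem.List.pyRange 0 (k : Int) 1).map
        (fun i => PySem.List.pyGetD c i 0 * PySem.List.pyGetD L i 0)).sum,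
     (L.drop 1).take k ++ L.drop k) := by
  induction k with
  | zero =>
    simp
  | succ k ih =>
    have hk' : k ≤ m := by omega
    have hcast : ((k + 1 : Nat) : Int) = (k : Int) + 1 := by push_cast; ring
    rw [hcast, PySem.List.pyRange_one_succ_right (by positivity), List.foldl_append,
        List.map_append, ih hk']
    simp only [List.foldl_cons, List.foldl_nil, List.map_cons, List.map_nil, List.sum_append,
      List.sum_cons, List.sum_nil]
    have hlenA : ((L.drop 1).take k).length = k := by
      rw [List.length_take, List.length_drop, hL]; omega
    rw [Prod.mk.injEq]
    constructor
    · -- sum component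
      have : PySem.List.pyGetD ((L.drop 1).take k ++ L.drop k) (k : Int) 0
          = PySem.List.pyGetD L (k : Int) 0 := by
        rw [PySem.List.pyGetD_natCast, PySem.List.pyGetD_natCast]
        simp only [List.getD_eq_getElem?_getD]
        rw [List.getElem?_append_right (by omega), hlenA, Nat.sub_self, List.getElem?_drop,
          Nat.add_zero]
      rw [this]; ring
    · -- list component
      rw [PySem.List.pySetD_of_nonneg _ _ (by positivity)]
      have htn : ((k : Int)).toNat = k := by omega
      rw [htn, List.set_append, if_neg (by omega), hlenA, Nat.sub_self]
      have hkL : k < L.length := by omega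
      rw [List.drop_eq_getElem_cons hkL, List.set_cons_zero]
      have hget : PySem.List.pyGetD L ((k : Int) + 1) 0 = L[k + 1] := by
        have : ((k : Int) + 1) = ((k + 1 : Nat) : Int) := by push_cast; ring
        rw [this, PySem.List.pyGetD_natCast, List.getD_eq_getElem?_getD,
          List.getElem?_eq_getElem (by omega), Option.getD_some]
      rw [hget, List.take_add_one]
      have : (L.drop 1)[k]? = some L[k + 1] := by
        rw [List.getElem?_drop, show 1 + k = k + 1 from by omega,
          List.getElem?_eq_getElem (by omega)]
      rw [this]
      simp



theorem pyGetD_drop (l : List Int) (k : Nat) (t : Int) (h0 : 0 ≤ t)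
    (h1 : (k : Int) + t < l.length) :
    PySem.List.pyGetD l ((k : Int) + t) 0 = PySem.List.pyGetD (l.drop k) t 0 := by
  have h1' : t < ((l.drop k).length : Int) := by rw [List.length_drop]; omega
  rw [PySem.List.pyGetD_eq_getElem l 0 (by omega) h1,
      PySem.List.pyGetD_eq_getElem (l.drop k) 0 h0 h1']
  simp only [List.getElem_drop]
  congr 1
  omega

theorem loop_eq (c : List Int) (m : Nat) (hm : 1 ≤ m) (hc : c.length = m + 1) :
    ∀ (fuel k : Nat) (seq : List Int), seq.length = k + m →
      aloop c (List.replicate m 0 ++ [1]) fuel (seq.drop k ++ [1])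
        (seq.take m ++ [1] ++ seq.drop m) =
      (fun r => r.take m ++ [1] ++ r.drop m)
        (bloop ((PySem.List.pyRange 0 ((c.length : Int) - 1) 1).filter
            (fun t => PySem.Int.mod (PySem.List.pyGetD c t 0) 2 == 1))
          (PySem.Int.mod (PySem.List.pyGetD c (-1) 0) 2)
          (List.replicate m 0) fuel k seq) := by
  intro fuel
  induction fuel with
  | zero => intro k seq hs; rfl
  | succ fuel ih =>
    intro k seq hs
    have hmc : ((c.length : Int) - 1) = (m : Int) := by rw [hc]; push_cast; ring
    simp only [aloop, bloop]
    set s := seq.drop k with hsdef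
    have hslen : s.length = m := by rw [hsdef, List.length_drop, hs]; omega
    rw [hmc, aloop_fold c (s ++ [1]) m (by simp [hslen]) _ m le_rfl]
    -- simplify the shifted register
    have hdrop1 : (s ++ [(1:Int)]).drop 1 = s.drop 1 ++ [1] :=
      List.drop_append_of_le_length (by omega)
    have hlen1 : (s.drop 1 ++ [(1:Int)]).length = m := by simp [hslen]; omega
    have htake : ((s ++ [(1:Int)]).drop 1).take m = s.drop 1 ++ [1] := by
      rw [hdrop1, ← hlen1, List.take_length]
    have hdropm : (s ++ [(1:Int)]).drop m = [1] := by
      rw [← hslen, List.drop_append_of_le_length le_rfl, List.drop_length, List.nil_append]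
    rw [htake, hdropm]
    -- the feedback bit computed by A equals the one computed by B
    have hbit :
        PySem.Int.mod (PySem.List.pyGetD c (-1) 0 * PySem.List.pyGetD (s ++ [1]) (-1) 0 +
          ((PySem.List.pyRange 0 (m : Int) 1).map
            (fun i => PySem.List.pyGetD c i 0 * PySem.List.pyGetD (s ++ [1]) i 0)).sum) 2 =
        PySem.Int.mod
          (((PySem.List.pyRange 0 (m : Int) 1).filter
              (fun t => PySem.Int.mod (PySem.List.pyGetD c t 0) 2 == 1)).foldl
            (fun b t => b + PySem.List.pyGetD seq ((k : Int) + t) 0)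
            (PySem.Int.mod (PySem.List.pyGetD c (-1) 0) 2)) 2 := by
      have hcongr :
          ((PySem.List.pyRange 0 (m : Int) 1).filter
              (fun t => PySem.Int.mod (PySem.List.pyGetD c t 0) 2 == 1)).foldl
            (fun b t => b + PySem.List.pyGetD seq ((k : Int) + t) 0)
            (PySem.Int.mod (PySem.List.pyGetD c (-1) 0) 2) =
          ((PySem.List.pyRange 0 (m : Int) 1).filter
              (fun t => PySem.Int.mod (PySem.List.pyGetD c t 0) 2 == 1)).foldl
            (fun b t => b + PySem.List.pyGetD s t 0)
            (PySem.Int.mod (PySem.List.pyGetD c (-1) 0) 2) := by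
        apply PySem.List.foldl_congr_mem
        intro acc t ht
        have ht' := List.mem_filter.mp ht |>.1
        rw [PySem.List.mem_pyRange_one] at ht'
        rw [hsdef, pyGetD_drop seq k t ht'.1 (by rw [hs]; push_cast; omega)]
      rw [hcongr, PySem.List.foldl_add]
      rw [PySem.List.pyGetD_neg_one_append_singleton, mul_one]
      have hmapeq :
          (PySem.List.pyRange 0 (m : Int) 1).map
            (fun i => PySem.List.pyGetD c i 0 * PySem.List.pyGetD (s ++ [1]) i 0) =
          (PySem.List.pyRange 0 (m : Int) 1).map
            (fun i => PySem.List.pyGetD c i 0 * PySem.List.pyGetD s i 0) := by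
        apply List.map_congr_left
        intro i hi
        rw [PySem.List.mem_pyRange_one] at hi
        rw [pyGetD_append_one s i hi.1 (by omega)]
      rw [hmapeq]
      have hpar := parity_sum c s (PySem.List.pyRange 0 (m : Int) 1)
      rw [PySem.Int.mod_eq_emod_of_pos (by norm_num), PySem.Int.mod_eq_emod_of_pos (by norm_num),
        PySem.Int.mod_eq_emod_of_pos (by norm_num)]
      omega
    rw [← hbit]
    set bit := PySem.Int.mod (PySem.List.pyGetD c (-1) 0 * PySem.List.pyGetD (s ++ [1]) (-1) 0 +
          ((PySem.List.pyRange 0 (m : Int) 1).map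
            (fun i => PySem.List.pyGetD c i 0 * PySem.List.pyGetD (s ++ [1]) i 0)).sum) 2 with hbitdef
    -- the register write at index len-2 appends the bit to the shifted state
    have hidx : ((c.length : Int) - 2) = ((m - 1 : Nat) : Int) := by rw [hc]; push_cast [hm]; ring
    have hlenA : (s.drop 1).length = m - 1 := by simp [hslen]
    have hset : PySem.List.pySetD ((s.drop 1 ++ [1]) ++ [1]) ((c.length : Int) - 2) bit
        = (s.drop 1 ++ [bit]) ++ [1] := by
      rw [hidx, PySem.List.pySetD_of_nonneg _ _ (by positivity), Int.toNat_natCast,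
        List.set_append, if_pos (by simp; omega), List.set_append,
        if_neg (by omega), hlenA, Nat.sub_self, List.set_cons_zero]
    rw [hset]
    -- B's trailing-window slice is A's new register
    have hsliceq : PySem.List.slice (seq ++ [bit]) (some ((k + 1 : Nat) : Int)) none
        = s.drop 1 ++ [bit] := by
      rw [PySem.List.slice_from_natCast, List.drop_append_of_le_length (by omega), hsdef,
        List.drop_drop]
    -- A's growing output equals B's assembled slices of the grown stream
    have hout : (seq.take m ++ [1] ++ seq.drop m) ++ [bit]
        = (seq ++ [bit]).take m ++ [1] ++ (seq ++ [bit]).drop m := by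
      rw [List.take_append_of_le_length (by omega), List.drop_append_of_le_length (by omega)]
      simp
    -- the two loop-exit tests agree
    by_cases hstop : s.drop 1 ++ [bit] = List.replicate m 0
    · rw [if_pos (by rw [hstop]), if_pos (by rw [hsliceq, hstop])]
      simpa using hout
    · rw [if_neg (fun hx => hstop ((List.append_left_inj [1]).mp hx)),
          if_neg (by rw [hsliceq]; exact hstop)]
      have hdropstep : List.drop (k + 1) (seq ++ [bit]) = List.drop 1 s ++ [bit] := by
        rw [List.drop_append_of_le_length (by omega), hsdef, List.drop_drop]
      have hrec := ih (k + 1) (seq ++ [bit]) (by simp [hs]; omega)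
      rw [hmc] at hrec
      rw [hout, ← hdropstep]
      exact hrec

-- ===== VERDICT (by name: the statement is the Claim_ definition above) =====
theorem createLRZforA_spec : Claim_equal_createLRZforA := by
  intro c _ hpre
  obtain ⟨hlen, -⟩ := hpre
  unfold Spec_createLRZforA createLRZforA createLRZforA_alt
  simp only [createIndexListLRZ_eq]
  have hm : 1 ≤ c.length - 1 := by omega
  have h := loop_eq c (c.length - 1) hm (by omega) (2 ^ (c.length - 1)) 0
      (List.replicate (c.length - 1) 0) (by simp)
  simp only [List.drop_zero] at h
  rw [List.take_replicate, min_self, List.drop_replicate, Nat.sub_self] at h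
  rw [PySem.List.slice_to_natCast, PySem.List.slice_from_natCast]
  simpa using h
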